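-- pv_equiv track=rewrite | github.com/mdbruffey/adventofcode | 2020/Day-6/Custom_Customs_part-2.py | get_families
-- ===== SOURCE A (Python) =====
-- def get_families(data):
--     families = []
--     string = ""
--     members = 0
--     for line in data:
--         if line == "\n":
--             families.append((string,members))
--             string = ""
--             members=0
--         else:
--             string += line.strip('\n')
--             members += 1
--
--     families.append((string,members))
--     return families
-- ===== SOURCE B (Python) =====
-- def get_families(data):
--     cuts = [i for i, line in enumerate(data) if line == "\n"]
--     bounds = [-1] + cuts + [len(data)]
--     return [("".join(s.strip("\n") for s in data[a + 1:b]), b - a - 1)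
--             for a, b in zip(bounds, bounds[1:])]
-- ===== Notes on version B (the rewrite author's own statement) =====
-- stated objective: alternative
-- what changed: B replaces A's streaming accumulate-and-flush loop by index arithmetic: it first collects the positions of all separator lines, forms the boundary list [-1]+cuts+[len(data)], and then produces each tuple from a slice data[a+1:b] between consecutive boundaries, with the member count computed as b-a-1 rather than counted incrementally.
import Mathlib
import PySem

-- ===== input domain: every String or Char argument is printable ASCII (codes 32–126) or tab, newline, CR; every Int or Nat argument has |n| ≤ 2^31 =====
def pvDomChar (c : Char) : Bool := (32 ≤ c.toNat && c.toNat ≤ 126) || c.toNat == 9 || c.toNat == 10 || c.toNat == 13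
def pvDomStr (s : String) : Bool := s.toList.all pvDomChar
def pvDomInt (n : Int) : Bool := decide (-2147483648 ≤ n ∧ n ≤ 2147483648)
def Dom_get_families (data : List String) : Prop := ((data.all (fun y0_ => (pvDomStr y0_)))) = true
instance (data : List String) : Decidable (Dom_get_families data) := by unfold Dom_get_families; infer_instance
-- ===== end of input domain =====

-- B computes the groups by index arithmetic — collect the separator positions, pair up
-- consecutive boundaries, take a slice per pair — instead of A's streaming
-- accumulate-and-flush loop: a genuinely different decomposition, same asymptotic cost.

-- ===== PORT A =====
def get_families (data : List String) : List (String × Int) :=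
  let st := data.foldl
    (fun (st : List (String × Int) × String × Int) line =>
      if line = "\n" then (st.1 ++ [(st.2.1, st.2.2)], "", 0)
      else (st.1, st.2.1 ++ PySem.Str.stripChars line "\n", st.2.2 + 1))
    ([], "", 0)
  st.1 ++ [(st.2.1, st.2.2)]

-- ===== PORT B =====
def get_families_alt (data : List String) : List (String × Int) :=
  let cuts := (PySem.List.enumerate data).filterMap
    (fun p => if p.2 = "\n" then some p.1 else none)
  let bounds := [(-1 : Int)] ++ cuts ++ [(data.length : Int)]
  (bounds.zip (PySem.List.slice bounds (some 1) none)).map (fun p =>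
    (PySem.Str.join ""
        ((PySem.List.slice data (some (p.1 + 1)) (some p.2)).map
          (fun s => PySem.Str.stripChars s "\n")),
     p.2 - p.1 - 1))

-- ===== PRECONDITION & SPEC =====
def Spec_get_families (data : List String) (out : List (String × Int)) : Prop := out = get_families_alt data
instance (data : List String) (out : List (String × Int)) : Decidable (Spec_get_families data out) := by unfold Spec_get_families; infer_instance

-- ===== CLAIM (what is proved, stated in full; the proofs are below) =====
def Claim_equal_get_families : Prop := ∀ (data : List String), Dom_get_families data → Spec_get_families data (get_families data)

-- ===== LEMMAS AND PROOFS =====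

-- names for the pieces of B's port
def pvStripNl (s : String) : String := PySem.Str.stripChars s "\n"

def pvJ (l : List String) : String := PySem.Str.join "" (l.map pvStripNl)

def pvG (data : List String) (p : Int × Int) : String × Int :=
  (pvJ (PySem.List.slice data (some (p.1 + 1)) (some p.2)), p.2 - p.1 - 1)

def pvC (data : List String) : List Int :=
  (PySem.List.enumerate data).filterMap (fun p => if p.2 = "\n" then some p.1 else none)

def pvM (data : List String) : List Int := pvC data ++ [(data.length : Int)]

-- A's loop, rewritten as a structural recursion on the data
def pvRunA (s : String) (m : Int) : List String → List (String × Int)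
  | [] => [(s, m)]
  | l :: ls =>
    if l = "\n" then (s, m) :: pvRunA "" 0 ls
    else pvRunA (s ++ pvStripNl l) (m + 1) ls

theorem pv_alt_eq (data : List String) :
    get_families_alt data = (((-1 : Int) :: pvM data).zip (pvM data)).map (pvG data) := by
  simp only [get_families_alt, PySem.List.slice_from_one]
  rfl

theorem pvC_shift (ls : List String) (s : Int) :
    (PySem.List.enumerate ls (s + 1)).filterMap (fun p => if p.2 = "\n" then some p.1 else none)
      = ((PySem.List.enumerate ls s).filterMap (fun p => if p.2 = "\n" then some p.1 else none)).map (· + 1) := by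
  induction ls generalizing s with
  | nil => simp [PySem.List.enumerate_nil]
  | cons l ls ih =>
    rw [PySem.List.enumerate_cons, PySem.List.enumerate_cons]
    by_cases hl : l = "\n" <;> simp [hl, ih (s + 1)]

theorem pvC_cons (l : String) (ls : List String) :
    pvC (l :: ls) = (if l = "\n" then [(0 : Int)] else []) ++ (pvC ls).map (· + 1) := by
  unfold pvC
  rw [PySem.List.enumerate_cons, List.filterMap_cons, pvC_shift ls 0]
  by_cases hl : l = "\n" <;> simp [hl]

theorem pvC_nonneg (ls : List String) : ∀ v ∈ pvC ls, (0 : Int) ≤ v := by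
  induction ls with
  | nil => simp [pvC, PySem.List.enumerate_nil]
  | cons l ls ih =>
    rw [pvC_cons]
    intro v hv
    rcases List.mem_append.1 hv with h | h
    · split at h <;> simp_all
    · obtain ⟨w, hw, rfl⟩ := List.mem_map.1 h
      have := ih w hw; omega

theorem pvM_nonneg (ls : List String) : ∀ v ∈ pvM ls, (0 : Int) ≤ v := by
  intro v hv
  rcases List.mem_append.1 hv with h | h
  · exact pvC_nonneg ls v h
  · simp_all

theorem pvM_map (l : String) (ls : List String) :
    pvM (l :: ls) = (if l = "\n" then [(0 : Int)] else []) ++ (pvM ls).map (· + 1) := by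
  unfold pvM
  rw [pvC_cons]
  by_cases hl : l = "\n" <;> simp [hl]

theorem pv_slice_cons_shift {α : Type} (x : α) (ls : List α) (a b : Int)
    (ha : 0 ≤ a) (hb : 0 ≤ b) :
    PySem.List.slice (x :: ls) (some (a + 1)) (some (b + 1)) = PySem.List.slice ls (some a) (some b) := by
  rw [PySem.List.slice_toNat, PySem.List.slice_toNat]
  have h2 : (b + 1).toNat - (a.toNat + 1) = b.toNat - a.toNat := by omega
  have h1 : (a + 1).toNat = a.toNat + 1 := by omega
  rw [h1, h2, List.drop_succ_cons]
  all_goals omega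

theorem pv_joinFlat (l : List String) : PySem.Str.join "" l = String.ofList (l.map String.toList).flatten := by
  induction l with
  | nil => rfl
  | cons x xs ih =>
    cases xs with
    | nil => simp [PySem.Str.join, PySem.Chars.join, List.intercalate]
    | cons y ys =>
      simp only [PySem.Str.join, PySem.Chars.join, List.intercalate] at ih ⊢
      simp at ih ⊢
      exact ih

theorem pv_join_cons (x : String) (xs : List String) :
    pvJ (x :: xs) = pvStripNl x ++ pvJ xs := by
  simp [pvJ, pv_joinFlat]

theorem pv_tail_map (pairs : List (Int × Int)) (x : String) (ls : List String)
    (h : ∀ p ∈ pairs, (-1 : Int) ≤ p.1 ∧ (0 : Int) ≤ p.2) :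
    (pairs.map (fun p => (p.1 + 1, p.2 + 1))).map (pvG (x :: ls)) = pairs.map (pvG ls) := by
  induction pairs with
  | nil => rfl
  | cons p ps ih =>
    obtain ⟨h1, h2⟩ := h p (List.mem_cons_self ..)
    simp only [List.map_cons]
    rw [ih (fun q hq => h q (List.mem_cons_of_mem _ hq))]
    congr 1
    unfold pvG
    have : PySem.List.slice (x :: ls) (some (p.1 + 1 + 1)) (some (p.2 + 1))
        = PySem.List.slice ls (some (p.1 + 1)) (some p.2) :=
      pv_slice_cons_shift x ls (p.1 + 1) p.2 (by omega) h2
    rw [this]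
    simp

theorem pv_zip_map (L K : List Int) :
    (L.map (· + 1)).zip (K.map (· + 1)) = (L.zip K).map (fun p => (p.1 + 1, p.2 + 1)) := by
  rw [List.zip_map]
  rfl

theorem pv_pairs_bound (ls : List String) :
    ∀ p ∈ (((-1 : Int) :: pvM ls).zip (pvM ls)), (-1 : Int) ≤ p.1 ∧ (0 : Int) ≤ p.2 := by
  intro p hp
  obtain ⟨h1, h2⟩ := List.of_mem_zip hp
  constructor
  · rcases List.mem_cons.1 h1 with h | h
    · omega
    · have := pvM_nonneg ls _ h; omega
  · exact pvM_nonneg ls _ h2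

theorem pv_G_head0 (x : String) (ls : List String) :
    pvG (x :: ls) (-1, 0) = ("", 0) := by
  unfold pvG
  norm_num
  rw [PySem.List.slice_to] <;> simp [pvJ, PySem.Str.join, PySem.Chars.join, List.intercalate]

theorem pv_alt_sep (ls : List String) :
    get_families_alt ("\n" :: ls) = ("", 0) :: get_families_alt ls := by
  rw [pv_alt_eq, pv_alt_eq]
  have hM : pvM ("\n" :: ls) = ((-1 : Int) :: pvM ls).map (· + 1) := by
    rw [pvM_map]; norm_num
  rw [hM]
  have hsplit : ((-1 : Int) :: pvM ls).map (· + 1) = (0 : Int) :: (pvM ls).map (· + 1) := by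
    norm_num
  conv_lhs => rw [show ((-1 : Int) :: ((-1 : Int) :: pvM ls).map (· + 1)).zip (((-1 : Int) :: pvM ls).map (· + 1))
      = ((-1 : Int), (0 : Int)) :: (((-1 : Int) :: pvM ls).map (· + 1)).zip ((pvM ls).map (· + 1)) by
    conv_lhs => rw [hsplit]
    rw [List.zip_cons_cons, hsplit]]
  rw [pv_zip_map, List.map_cons, pv_G_head0, pv_tail_map _ _ _ (pv_pairs_bound ls)]

theorem pv_G_head (x : String) (ls : List String) (m0 : Int) (hm : 0 ≤ m0) :
    pvG (x :: ls) (-1, m0 + 1) = (pvStripNl x ++ (pvG ls (-1, m0)).1, (pvG ls (-1, m0)).2 + 1) := by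
  unfold pvG
  norm_num
  rw [PySem.List.slice_to, PySem.List.slice_to]
  · have h1 : (m0 + 1).toNat = m0.toNat + 1 := by omega
    rw [h1, List.take_succ_cons, pv_join_cons]
  · omega
  · omega

theorem pv_pairs_bound' (ls : List String) (m0 : Int) (K : List Int) (hMK : pvM ls = m0 :: K) :
    ∀ p ∈ ((m0 :: K).zip K), (-1 : Int) ≤ p.1 ∧ (0 : Int) ≤ p.2 := by
  intro p hp
  obtain ⟨h1, h2⟩ := List.of_mem_zip hp
  rw [← hMK] at h1
  have h2' : p.2 ∈ pvM ls := by rw [hMK]; exact List.mem_cons_of_mem _ h2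
  exact ⟨by have := pvM_nonneg ls _ h1; omega, pvM_nonneg ls _ h2'⟩

theorem pv_alt_line (l : String) (ls : List String) (hl : l ≠ "\n") :
    get_families_alt (l :: ls)
      = (pvStripNl l ++ (get_families_alt ls).headI.1, (get_families_alt ls).headI.2 + 1)
          :: (get_families_alt ls).tail := by
  have hne : pvM ls ≠ [] := by simp [pvM]
  obtain ⟨m0, K, hMK⟩ := List.exists_cons_of_ne_nil hne
  have hm0 : 0 ≤ m0 := pvM_nonneg ls m0 (by rw [hMK]; exact List.mem_cons_self ..)
  rw [pv_alt_eq, pv_alt_eq]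
  have hM : pvM (l :: ls) = (m0 + 1) :: K.map (· + 1) := by
    rw [pvM_map, if_neg hl, hMK]; simp
  rw [hM, hMK]
  rw [show ((-1 : Int) :: (m0 + 1) :: K.map (· + 1)).zip ((m0 + 1) :: K.map (· + 1))
      = ((-1 : Int), m0 + 1) :: ((m0 :: K).map (· + 1)).zip (K.map (· + 1)) by
    rw [List.zip_cons_cons]; simp]
  rw [List.zip_cons_cons, pv_zip_map, List.map_cons, List.map_cons,
      pv_tail_map _ _ _ (pv_pairs_bound' ls m0 K hMK), pv_G_head l ls m0 hm0]
  simp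

theorem pv_alt_ne_nil (ls : List String) : get_families_alt ls ≠ [] := by
  have hne : pvM ls ≠ [] := by simp [pvM]
  obtain ⟨m0, K, hMK⟩ := List.exists_cons_of_ne_nil hne
  rw [pv_alt_eq, hMK]
  simp

theorem pv_foldA (data : List String) : ∀ (acc : List (String × Int)) (s : String) (m : Int),
    (data.foldl
      (fun (st : List (String × Int) × String × Int) line =>
        if line = "\n" then (st.1 ++ [(st.2.1, st.2.2)], "", 0)
        else (st.1, st.2.1 ++ PySem.Str.stripChars line "\n", st.2.2 + 1))
      (acc, s, m)).1
    ++ [((data.foldl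
      (fun (st : List (String × Int) × String × Int) line =>
        if line = "\n" then (st.1 ++ [(st.2.1, st.2.2)], "", 0)
        else (st.1, st.2.1 ++ PySem.Str.stripChars line "\n", st.2.2 + 1))
      (acc, s, m)).2.1,
        (data.foldl
      (fun (st : List (String × Int) × String × Int) line =>
        if line = "\n" then (st.1 ++ [(st.2.1, st.2.2)], "", 0)
        else (st.1, st.2.1 ++ PySem.Str.stripChars line "\n", st.2.2 + 1))
      (acc, s, m)).2.2)]
    = acc ++ pvRunA s m data := by
  induction data with
  | nil => intro acc s m; simp [pvRunA]
  | cons l ls ih =>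
    intro acc s m
    by_cases hl : l = "\n"
    · simp only [List.foldl_cons, if_pos hl, pvRunA, ih]
      simp
    · simp only [List.foldl_cons, if_neg hl, pvRunA, ih, pvStripNl]

theorem pv_A_eq (data : List String) : get_families data = pvRunA "" 0 data := by
  unfold get_families
  have := pv_foldA data [] "" 0
  simpa using this

theorem pv_runA_eq (data : List String) : ∀ (s : String) (m : Int),
    pvRunA s m data
      = (s ++ (get_families_alt data).headI.1, m + (get_families_alt data).headI.2)
          :: (get_families_alt data).tail := by
  induction data with
  | nil =>
    intro s m
    have h : get_families_alt [] = [("", 0)] := by decide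
    rw [h]
    simp [pvRunA]
  | cons l ls ih =>
    intro s m
    by_cases hl : l = "\n"
    · subst hl
      rw [pv_alt_sep]
      obtain ⟨h, t, ht⟩ := List.exists_cons_of_ne_nil (pv_alt_ne_nil ls)
      simp only [pvRunA, ih "" 0, ht]
      simp
    · rw [pv_alt_line l ls hl]
      simp only [pvRunA, if_neg hl, ih (s ++ pvStripNl l) (m + 1)]
      simp [String.append_assoc]
      omega

-- ===== VERDICT (by name: the statement is the Claim_ definition above) =====
theorem get_families_spec : Claim_equal_get_families := by
  intro data _
  unfold Spec_get_families
  rw [pv_A_eq, pv_runA_eq data "" 0]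
  obtain ⟨h, t, ht⟩ := List.exists_cons_of_ne_nil (pv_alt_ne_nil data)
  simp [ht]
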